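-- pv_equiv track=rewrite | github.com/johnzastrow/garminview | backend/garminview/analysis/hr_zones.py | classify_readings
-- ===== SOURCE A (Python) =====
-- def classify_readings(
--     valid_readings: list[int], thresholds: dict[int, tuple[int, int]]
-- ) -> dict[int, int]:
--     """Count valid readings per zone.
--
--     Readings below the Zone 1 lower bound count as Zone 1.
--     Readings at or above the Zone 5 upper bound count as Zone 5.
--     Returns {zone: count}.
--     """
--     counts = {z: 0 for z in thresholds}
--     sorted_zones = sorted(thresholds.items())
--     min_lo = sorted_zones[0][1][0]
--     max_hi = sorted_zones[-1][1][1]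
--
--     for r in valid_readings:
--         if r < min_lo:
--             counts[sorted_zones[0][0]] += 1
--         elif r >= max_hi:
--             counts[sorted_zones[-1][0]] += 1
--         else:
--             for zone, (lo, hi) in sorted_zones:
--                 if lo <= r < hi:
--                     counts[zone] += 1
--                     break
--
--     return counts
-- ===== SOURCE B (Python) =====
-- def classify_readings(
--     valid_readings: list[int], thresholds: dict[int, tuple[int, int]]
-- ) -> dict[int, int]:
--     """Count valid readings per zone, zone-major.
--
--     Instead of scanning the zone table once per reading, partition the
--     readings in staged passes: split off the below-min and at-or-above-max
--     readings (A's clamp rules), then walk the zones once, each zone taking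
--     (and removing) the still-unassigned readings inside its interval --
--     which reproduces A's first-matching-zone rule exactly.
--     """
--     sz = sorted(thresholds.items())
--     min_lo = sz[0][1][0]
--     max_hi = sz[-1][1][1]
--
--     below = [r for r in valid_readings if r < min_lo]
--     rest = [r for r in valid_readings if r >= min_lo]
--     above = [r for r in rest if r >= max_hi]
--     pending = [r for r in rest if r < max_hi]
--
--     counts = {z: 0 for z in thresholds}
--     counts[sz[0][0]] += len(below)
--     counts[sz[-1][0]] += len(above)
--     for z, (lo, hi) in sz:
--         counts[z] += len([r for r in pending if lo <= r < hi])
--         pending = [r for r in pending if not (lo <= r < hi)]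
--     return counts
-- ===== Notes on version B (the rewrite author's own statement) =====
-- stated objective: alternative
-- what changed: B transposes the loops: instead of A's reading-major loop with an inner zone scan and break, B first partitions the readings into below-min / at-or-above-max / in-range lists, then walks the zones once, each zone counting and removing the still-unassigned readings in its interval (first-matching-zone semantics preserved by the removal).
import Mathlib
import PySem

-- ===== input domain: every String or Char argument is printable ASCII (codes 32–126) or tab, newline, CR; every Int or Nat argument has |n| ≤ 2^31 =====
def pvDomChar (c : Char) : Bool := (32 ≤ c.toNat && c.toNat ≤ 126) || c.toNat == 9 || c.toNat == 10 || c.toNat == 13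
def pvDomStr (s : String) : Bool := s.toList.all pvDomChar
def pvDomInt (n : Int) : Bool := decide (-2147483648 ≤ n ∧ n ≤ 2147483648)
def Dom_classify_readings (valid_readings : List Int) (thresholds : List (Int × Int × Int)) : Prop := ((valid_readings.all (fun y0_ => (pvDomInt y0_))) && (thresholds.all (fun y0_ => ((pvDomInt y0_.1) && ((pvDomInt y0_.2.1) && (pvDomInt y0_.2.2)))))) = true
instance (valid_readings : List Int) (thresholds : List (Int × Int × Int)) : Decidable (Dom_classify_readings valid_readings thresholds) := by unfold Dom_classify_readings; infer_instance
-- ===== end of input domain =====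

-- B transposes the loops (alternative, same cost): readings are partitioned in staged passes
-- (below-min / at-or-above-max / in-range), then one zone-major walk counts and removes the
-- still-unassigned readings per zone, instead of A's reading-major loop with an inner zone scan.


-- ===== PORT A =====
-- inner 'for zone, (lo, hi) in sorted_zones: if lo <= r < hi: counts[zone] += 1; break'
-- ('counts[zone] += 1' is ported as modify zone 0 (·+1): zone is always a key of counts, so no KeyError arises)
def pvScanInc (sz : List (Int × Int × Int)) (r : Int) (c : PySem.Dict Int Int) : PySem.Dict Int Int :=
  match sz with
  | [] => c
  | (z, lo, hi) :: rest => if lo ≤ r ∧ r < hi then c.modify z 0 (· + 1) else pvScanInc rest r c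

-- sorted(thresholds.items()): Python sorts the (key, (lo, hi)) pairs lexicographically; dict keys are
-- unique (Pre_ below), so the stable sort by key alone is exactly Python's tuple sort.
def classify_readings (valid_readings : List Int) (thresholds : List (Int × Int × Int)) : List (Int × Int) :=
  let counts0 : PySem.Dict Int Int :=
    thresholds.foldl (fun c t => c.insert t.1 0) PySem.Dict.empty
  match PySem.List.sorted thresholds (fun t => t.1) false with
  | [] => []   -- sorted_zones[0] raises IndexError (empty dict): excluded by Pre_
  | first :: restz =>
    let sz := first :: restz
    let last := sz.getLast (by simp)
    let min_lo := first.2.1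
    let max_hi := last.2.2
    let counts := valid_readings.foldl (fun c r =>
      if r < min_lo then c.modify first.1 0 (· + 1)
      else if max_hi ≤ r then c.modify last.1 0 (· + 1)
      else pvScanInc sz r c) counts0
    counts.items

-- ===== PORT B =====
-- one zone step: 'counts[z] += len([r for r in pending if lo <= r < hi]); pending = [r for r in pending if not ...]'
def pvZoneStep (st : PySem.Dict Int Int × List Int) (t : Int × Int × Int) : PySem.Dict Int Int × List Int :=
  (st.1.modify t.1 0 (· + ((st.2.filter (fun r => decide (t.2.1 ≤ r ∧ r < t.2.2))).length : Int)),
   st.2.filter (fun r => !decide (t.2.1 ≤ r ∧ r < t.2.2)))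

def classify_readings_alt (valid_readings : List Int) (thresholds : List (Int × Int × Int)) : List (Int × Int) :=
  match PySem.List.sorted thresholds (fun t => t.1) false with
  | [] => []   -- sz[0] raises IndexError (empty dict): excluded by Pre_
  | first :: restz =>
    let sz := first :: restz
    let last := sz.getLast (by simp)
    let min_lo := first.2.1
    let max_hi := last.2.2
    let below := valid_readings.filter (fun r => decide (r < min_lo))
    let rest := valid_readings.filter (fun r => decide (min_lo ≤ r))
    let above := rest.filter (fun r => decide (max_hi ≤ r))
    let pending := rest.filter (fun r => decide (r < max_hi))
    let counts0 : PySem.Dict Int Int :=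
      thresholds.foldl (fun c t => c.insert t.1 0) PySem.Dict.empty
    let counts1 := counts0.modify first.1 0 (· + (below.length : Int))
    let counts2 := counts1.modify last.1 0 (· + (above.length : Int))
    (sz.foldl pvZoneStep (counts2, pending)).1.items

-- ===== PRECONDITION & SPEC =====
-- Pre_ excludes the empty dict (A raises IndexError on sorted_zones[0]) and association lists with
-- duplicate keys, which cannot arise from a Python dict argument (an artifact of the list encoding).
def Pre_classify_readings (valid_readings : List Int) (thresholds : List (Int × Int × Int)) : Prop :=
  thresholds ≠ [] ∧ (thresholds.map (·.1)).Nodup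
instance (valid_readings : List Int) (thresholds : List (Int × Int × Int)) : Decidable (Pre_classify_readings valid_readings thresholds) := by unfold Pre_classify_readings; infer_instance
def pvWitness_classify_readings : List Int × (List (Int × Int × Int)) :=
  ([40, 95, 120, 200, 300], [(1, 90, 110), (2, 110, 140), (3, 140, 170)])

def Spec_classify_readings (valid_readings : List Int) (thresholds : List (Int × Int × Int)) (out : List (Int × Int)) : Prop := out = classify_readings_alt valid_readings thresholds
instance (valid_readings : List Int) (thresholds : List (Int × Int × Int)) (out : List (Int × Int)) : Decidable (Spec_classify_readings valid_readings thresholds out) := by unfold Spec_classify_readings; infer_instance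

-- ===== CLAIM (what is proved, stated in full; the proofs are below) =====
def Claim_equal_classify_readings : Prop := ∀ (valid_readings : List Int) (thresholds : List (Int × Int × Int)), Dom_classify_readings valid_readings thresholds → Pre_classify_readings valid_readings thresholds → Spec_classify_readings valid_readings thresholds (classify_readings valid_readings thresholds)

-- ===== LEMMAS AND PROOFS =====

-- first matching zone of the scan, as a label (used only in the proofs to relate the two programs)
def pvScanZone (sz : List (Int × Int × Int)) (r : Int) : Option Int :=
  match sz with
  | [] => none
  | (z, lo, hi) :: rest => if lo ≤ r ∧ r < hi then some z else pvScanZone rest r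

def pvZoneOf (sz : List (Int × Int × Int)) (first last : Int × Int × Int)
    (min_lo max_hi r : Int) : Option Int :=
  if r < min_lo then some first.1
  else if max_hi ≤ r then some last.1
  else pvScanZone sz r

theorem pvScanInc_eq (sz : List (Int × Int × Int)) (r : Int) (c : PySem.Dict Int Int) :
    pvScanInc sz r c = match pvScanZone sz r with
      | some z => c.modify z 0 (· + 1)
      | none => c := by
  induction sz with
  | nil => rfl
  | cons t rest ih =>
    obtain ⟨z, lo, hi⟩ := t
    simp only [pvScanInc, pvScanZone]
    split_ifs <;> simp [ih]

theorem pvScanZone_mem {sz : List (Int × Int × Int)} {r z : Int}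
    (h : pvScanZone sz r = some z) : z ∈ sz.map (·.1) := by
  induction sz with
  | nil => simp [pvScanZone] at h
  | cons t rest ih =>
    obtain ⟨y, lo, hi⟩ := t
    simp only [pvScanZone] at h
    split_ifs at h with hc
    · simp at h; simp [h]
    · simpa using Or.inr (by simpa using ih h)

theorem pvItems_empty : (PySem.Dict.empty : PySem.Dict Int Int).items = [] := by decide

theorem pvStepA_eq (sz : List (Int × Int × Int)) (first last : Int × Int × Int)
    (min_lo max_hi : Int) (c : PySem.Dict Int Int) (r : Int) :
    (if r < min_lo then c.modify first.1 0 (· + 1)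
     else if max_hi ≤ r then c.modify last.1 0 (· + 1)
     else pvScanInc sz r c)
    = match pvZoneOf sz first last min_lo max_hi r with
      | some z => c.modify z 0 (· + 1)
      | none => c := by
  unfold pvZoneOf
  split_ifs <;> simp [pvScanInc_eq]

-- keys are unchanged by A's counting loop when every label is already a key
theorem pvKeys_loop (zf : Int → Option Int) (vr : List Int) (d : PySem.Dict Int Int)
    (hmem : ∀ r z, zf r = some z → z ∈ d.keys) :
    (vr.foldl (fun c r => match zf r with
      | some y => c.modify y 0 (· + 1)
      | none => c) d).keys = d.keys := by
  induction vr generalizing d with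
  | nil => rfl
  | cons r rest ih =>
    simp only [List.foldl_cons]
    cases hz : zf r with
    | none =>
      exact ih d hmem
    | some y =>
      have hk : (d.modify y 0 (· + 1)).keys = d.keys := by
        rw [PySem.Dict.keys_modify,
          PySem.Dict.keys_insert_of_contains _ _
            ((PySem.Dict.contains_iff_mem_keys d y).2 (hmem r y hz))]
      rw [ih (d.modify y 0 (· + 1)) (by intro r' z' h'; rw [hk]; exact hmem r' z' h'), hk]

theorem pvGetD_loop (zf : Int → Option Int) (vr : List Int) (d : PySem.Dict Int Int) (z : Int) :
    (vr.foldl (fun c r => match zf r with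
      | some y => c.modify y 0 (· + 1)
      | none => c) d).getD z 0
    = d.getD z 0 + ((vr.map zf).count (some z) : Int) := by
  induction vr generalizing d with
  | nil => simp
  | cons r rest ih =>
    simp only [List.foldl_cons, List.map_cons]
    cases hz : zf r with
    | none =>
      rw [ih d, List.count_cons]
      simp
    | some y =>
      rw [ih (d.modify y 0 (· + 1)), PySem.Dict.getD_modify, List.count_cons]
      by_cases hzy : z = y
      · simp only [hzy, beq_self_eq_true, if_true]
        push_cast
        ring
      · have hne' : (some y == some z) = false := by
          simp [Ne.symm hzy]
        simp [hzy, hne']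

theorem pvCount_scan_notkey (rest : List (Int × Int × Int)) (l : List Int) {z : Int}
    (h : z ∉ rest.map (·.1)) :
    (l.map (pvScanZone rest)).count (some z) = 0 := by
  rw [List.count_eq_zero]
  intro hmem
  obtain ⟨r, _, hr⟩ := List.mem_map.1 hmem
  exact h (pvScanZone_mem hr)

theorem pvCount_scan_cons (t : Int × Int × Int) (rest : List (Int × Int × Int))
    (P : List Int) (z : Int) :
    (P.map (pvScanZone (t :: rest))).count (some z)
    = (if t.1 = z then (P.filter (fun r => decide (t.2.1 ≤ r ∧ r < t.2.2))).length else 0)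
      + ((P.filter (fun r => !decide (t.2.1 ≤ r ∧ r < t.2.2))).map (pvScanZone rest)).count (some z) := by
  induction P with
  | nil => simp
  | cons r P ih =>
    by_cases hm : t.2.1 ≤ r ∧ r < t.2.2
    · have e1 : (r :: P).filter (fun r => decide (t.2.1 ≤ r ∧ r < t.2.2))
          = r :: P.filter (fun r => decide (t.2.1 ≤ r ∧ r < t.2.2)) := by
        rw [List.filter_cons, if_pos (by simp [hm])]
      have e2 : (r :: P).filter (fun r => !decide (t.2.1 ≤ r ∧ r < t.2.2))
          = P.filter (fun r => !decide (t.2.1 ≤ r ∧ r < t.2.2)) := by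
        rw [List.filter_cons, if_neg (by simp [hm])]
      have e3 : pvScanZone (t :: rest) r = some t.1 := by
        obtain ⟨z', lo, hi⟩ := t
        simp only [pvScanZone]
        exact if_pos hm
      rw [List.map_cons, e3, List.count_cons, ih, e1, e2, List.length_cons]
      by_cases hz : t.1 = z <;> split_ifs <;> simp_all <;> omega
    · have e1 : (r :: P).filter (fun r => decide (t.2.1 ≤ r ∧ r < t.2.2))
          = P.filter (fun r => decide (t.2.1 ≤ r ∧ r < t.2.2)) := by
        rw [List.filter_cons, if_neg (by simp [hm])]
      have e2 : (r :: P).filter (fun r => !decide (t.2.1 ≤ r ∧ r < t.2.2))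
          = r :: P.filter (fun r => !decide (t.2.1 ≤ r ∧ r < t.2.2)) := by
        rw [List.filter_cons, if_pos (by simp [hm])]
      have e3 : pvScanZone (t :: rest) r = pvScanZone rest r := by
        obtain ⟨z', lo, hi⟩ := t
        simp only [pvScanZone]
        exact if_neg hm
      rw [List.map_cons, e3, List.count_cons, ih, e1, e2, List.map_cons, List.count_cons]
      by_cases hz : pvScanZone rest r = some z <;> split_ifs <;> simp_all <;> omega

theorem pvZoneFold_keys (szl : List (Int × Int × Int)) (d : PySem.Dict Int Int) (P : List Int)
    (h : ∀ t ∈ szl, t.1 ∈ d.keys) :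
    ((szl.foldl pvZoneStep (d, P)).1).keys = d.keys := by
  induction szl generalizing d P with
  | nil => rfl
  | cons t rest ih =>
    simp only [List.foldl_cons]
    have hk : (pvZoneStep (d, P) t).1.keys = d.keys := by
      show (d.modify t.1 0 _).keys = d.keys
      rw [PySem.Dict.keys_modify,
        PySem.Dict.keys_insert_of_contains _ _
          ((PySem.Dict.contains_iff_mem_keys d t.1).2 (h t List.mem_cons_self))]
    rw [show pvZoneStep (d, P) t = ((pvZoneStep (d, P) t).1, (pvZoneStep (d, P) t).2) from rfl,
      ih _ _ (by intro t' ht'; rw [hk]; exact h t' (List.mem_cons_of_mem _ ht')), hk]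

theorem pvZoneFold_getD (szl : List (Int × Int × Int)) (hnd : (szl.map (·.1)).Nodup)
    (d : PySem.Dict Int Int) (P : List Int) (z : Int) :
    ((szl.foldl pvZoneStep (d, P)).1).getD z 0
    = d.getD z 0 + ((P.map (pvScanZone szl)).count (some z) : Int) := by
  induction szl generalizing d P with
  | nil =>
    rw [pvCount_scan_notkey [] P (by simp)]
    simp
  | cons t rest ih =>
    simp only [List.map_cons, List.nodup_cons] at hnd
    simp only [List.foldl_cons]
    have hfst : (pvZoneStep (d, P) t).1
        = d.modify t.1 0 (· + (((P.filter (fun r => decide (t.2.1 ≤ r ∧ r < t.2.2))).length : Int))) := rfl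
    have hsnd : (pvZoneStep (d, P) t).2 = P.filter (fun r => !decide (t.2.1 ≤ r ∧ r < t.2.2)) := rfl
    rw [show pvZoneStep (d, P) t = ((pvZoneStep (d, P) t).1, (pvZoneStep (d, P) t).2) from rfl,
      ih hnd.2, hfst, hsnd, pvCount_scan_cons, PySem.Dict.getD_modify]
    by_cases hz : t.1 = z
    · subst hz
      rw [if_pos rfl, if_pos rfl, pvCount_scan_notkey rest _ hnd.1]
      push_cast
      ring
    · rw [if_neg (fun h => hz h.symm), if_neg hz]
      push_cast
      ring

-- ===== VERDICT (by name: the statement is the Claim_ definition above) =====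
theorem classify_readings_spec : Claim_equal_classify_readings := by
  intro vr th _ hpre
  obtain ⟨hne, hnd⟩ := hpre
  unfold Spec_classify_readings classify_readings classify_readings_alt
  cases hsz : PySem.List.sorted th (fun t => t.1) false with
  | nil => exact absurd ((PySem.List.sorted_eq_nil_iff th _ false).1 hsz) hne
  | cons first restz =>
    dsimp only
    set sz : List (Int × Int × Int) := first :: restz with hszdef
    set last := sz.getLast (by simp) with hlast
    set zf := pvZoneOf sz first last first.2.1 last.2.2 with hzf
    set counts0 : PySem.Dict Int Int :=
      th.foldl (fun c t => c.insert t.1 0) PySem.Dict.empty with hc0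
    set below := vr.filter (fun r => decide (r < first.2.1)) with hbelow
    set rest := vr.filter (fun r => decide (first.2.1 ≤ r)) with hrest
    set above := rest.filter (fun r => decide (last.2.2 ≤ r)) with habove
    set pending := rest.filter (fun r => decide (r < last.2.2)) with hpending
    have hperm := PySem.List.sorted_perm th (fun t => t.1) false
    rw [hsz] at hperm
    have hndsz : (sz.map (·.1)).Nodup := ((hperm.map (·.1)).nodup_iff).2 hnd
    have hitems0 : counts0.items = th.map (fun t => (t.1, (0 : Int))) := by
      rw [hc0, PySem.Dict.items_foldl_insert_fresh th (fun t => t.1) (fun _ => 0)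
        PySem.Dict.empty (by intro a _; simp) hnd]
      simp [pvItems_empty]
    have hkeys0 : counts0.keys = th.map (fun t => t.1) := by
      show counts0.items.map (·.1) = _
      rw [hitems0, List.map_map]
      rfl
    have hnd0 : counts0.keys.Nodup := by rw [hkeys0]; exact hnd
    have hfirstk : first.1 ∈ counts0.keys := by
      rw [hkeys0]
      exact List.mem_map_of_mem (hperm.mem_iff.1 (by rw [hszdef]; exact List.mem_cons_self))
    have hlastk : last.1 ∈ counts0.keys := by
      rw [hkeys0]
      exact List.mem_map_of_mem (hperm.mem_iff.1 (by rw [hlast]; exact List.getLast_mem _))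
    have hmem : ∀ r z, zf r = some z → z ∈ counts0.keys := by
      intro r z hz
      rw [hzf] at hz
      unfold pvZoneOf at hz
      split_ifs at hz with h1 h2
      · simp only [Option.some.injEq] at hz
        exact hz ▸ hfirstk
      · simp only [Option.some.injEq] at hz
        exact hz ▸ hlastk
      · rw [hkeys0]
        obtain ⟨t, ht, rfl⟩ := List.mem_map.1 (pvScanZone_mem hz)
        exact List.mem_map_of_mem (hperm.mem_iff.1 ht)
    -- A's loop through the label function
    have hfold :
        vr.foldl (fun c r =>
          if r < first.2.1 then c.modify first.1 0 (· + 1)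
          else if last.2.2 ≤ r then c.modify last.1 0 (· + 1)
          else pvScanInc sz r c) counts0
        = vr.foldl (fun c r => match zf r with
            | some y => c.modify y 0 (· + 1)
            | none => c) counts0 := by
      simp only [pvStepA_eq, hzf]
    rw [hfold]
    have hkeysF := pvKeys_loop zf vr counts0 hmem
    have hndF : (vr.foldl (fun c r => match zf r with
        | some y => c.modify y 0 (· + 1) | none => c) counts0).keys.Nodup := by
      rw [hkeysF]; exact hnd0
    rw [PySem.Dict.items_eq_map_keys _ hndF 0, hkeysF, hkeys0, List.map_map]
    -- B's dict
    set counts1 := counts0.modify first.1 0 (· + (below.length : Int)) with hc1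
    set counts2 := counts1.modify last.1 0 (· + (above.length : Int)) with hc2
    have hk1 : counts1.keys = counts0.keys := by
      rw [hc1, PySem.Dict.keys_modify, PySem.Dict.keys_insert_of_contains _ _
        ((PySem.Dict.contains_iff_mem_keys _ _).2 hfirstk)]
    have hk2 : counts2.keys = counts0.keys := by
      rw [hc2, PySem.Dict.keys_modify, PySem.Dict.keys_insert_of_contains _ _
        ((PySem.Dict.contains_iff_mem_keys _ _).2 (by rw [hk1]; exact hlastk)), hk1]
    have hall : ∀ t ∈ sz, t.1 ∈ counts2.keys := by
      intro t ht
      rw [hk2, hkeys0]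
      exact List.mem_map_of_mem (hperm.mem_iff.1 ht)
    have hkB := pvZoneFold_keys sz counts2 pending hall
    have hndB : ((sz.foldl pvZoneStep (counts2, pending)).1).keys.Nodup := by
      rw [hkB, hk2]; exact hnd0
    rw [PySem.Dict.items_eq_map_keys _ hndB 0, hkB, hk2, hkeys0, List.map_map]
    apply List.map_congr_left
    intro t ht
    simp only [Function.comp_apply]
    congr 1
    rw [pvGetD_loop, pvZoneFold_getD sz hndsz counts2 pending t.1]
    -- split the label counts over the partition below / above / pending
    have hcompl1 : vr.filter (fun r => !decide (r < first.2.1)) = rest := by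
      rw [hrest]
      apply List.filter_congr
      intro r _
      by_cases h : r < first.2.1
      · simp [h, not_le.2 h]
      · simp [h, not_lt.1 h]
    have hcompl2 : rest.filter (fun r => !decide (last.2.2 ≤ r)) = pending := by
      rw [hpending]
      apply List.filter_congr
      intro r _
      by_cases h : last.2.2 ≤ r
      · simp [h, not_lt.2 h]
      · simp [h, not_le.1 h]
    have hp1 : (below ++ rest).Perm vr := by
      rw [hbelow, ← hcompl1]; exact List.filter_append_perm _ vr
    have hp2 : (above ++ pending).Perm rest := by
      rw [habove, ← hcompl2]; exact List.filter_append_perm _ rest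
    have hb : (below.map zf).count (some t.1) = if first.1 = t.1 then below.length else 0 := by
      have hconst : below.map zf = below.map (fun _ => some first.1) := by
        apply List.map_congr_left
        intro r hr
        have hrlt : r < first.2.1 := by simpa using (List.mem_filter.1 hr).2
        rw [hzf]; unfold pvZoneOf; rw [if_pos hrlt]
      rw [hconst, List.map_const']
      by_cases h : first.1 = t.1
      · simp [h]
      · simp [h, List.count_replicate]
    have ha : (above.map zf).count (some t.1) = if last.1 = t.1 then above.length else 0 := by
      have hconst : above.map zf = above.map (fun _ => some last.1) := by
        apply List.map_congr_left
        intro r hr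
        have hge : first.2.1 ≤ r := by
          simpa using (List.mem_filter.1 (List.mem_filter.1 hr).1).2
        have hmax : last.2.2 ≤ r := by simpa using (List.mem_filter.1 hr).2
        rw [hzf]; unfold pvZoneOf; rw [if_neg (not_lt.2 hge), if_pos hmax]
      rw [hconst, List.map_const']
      by_cases h : last.1 = t.1
      · simp [h]
      · simp [h, List.count_replicate]
    have hpmap : pending.map zf = pending.map (pvScanZone sz) := by
      apply List.map_congr_left
      intro r hr
      have hge : first.2.1 ≤ r := by
        simpa using (List.mem_filter.1 (List.mem_filter.1 hr).1).2
      have hlt : r < last.2.2 := by simpa using (List.mem_filter.1 hr).2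
      rw [hzf]; unfold pvZoneOf; rw [if_neg (not_lt.2 hge), if_neg (not_le.2 hlt)]
    have hsplit : (vr.map zf).count (some t.1)
        = (if first.1 = t.1 then below.length else 0)
          + (if last.1 = t.1 then above.length else 0)
          + (pending.map (pvScanZone sz)).count (some t.1) := by
      rw [← (hp1.map zf).count_eq, List.map_append, List.count_append, hb,
        ← (hp2.map zf).count_eq, List.map_append, List.count_append, ha, hpmap]
      omega
    rw [hsplit, hc2, hc1]
    simp only [PySem.Dict.getD_modify]
    push_cast
    by_cases h1 : first.1 = t.1 <;> by_cases h2 : last.1 = t.1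
    · rw [if_pos h1, if_pos h2, if_pos h2.symm, if_pos (h2.trans h1.symm), h1]
      ring
    · rw [if_pos h1, if_neg h2, if_neg (fun h => h2 h.symm), if_pos h1.symm, h1]
      ring
    · rw [if_neg h1, if_pos h2, if_pos h2.symm, if_neg (fun h => h1 (h.symm.trans h2)), h2]
      ring
    · rw [if_neg h1, if_neg h2, if_neg (fun h => h2 h.symm), if_neg (fun h => h1 h.symm)]
      ring
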